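-- pv_equiv track=rewrite | github.com/HamedMusleh/AES-128-CBC-From-Scratch | task2_aes.py | inv_sub_bytes_state
-- ===== SOURCE A (Python) =====
-- def gf256_inv(a: int) -> int:
--     if a == 0:
--         return 0
--     modulus = 0x11B
--     r0, r1 = modulus, a
--     t0, t1 = 0, 1
--     while r1 != 0:
--         deg_r0 = r0.bit_length() - 1
--         deg_r1 = r1.bit_length() - 1
--         shift = deg_r0 - deg_r1
--         if shift < 0:
--             r0, r1 = r1, r0
--             t0, t1 = t1, t0
--             shift = -shift
--         r0 ^= r1 << shift
--         t0 ^= t1 << shift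
--     # reduce t0 modulo modulus so it's < 256
--     while t0.bit_length() > 8:
--         shift = t0.bit_length() - 9
--         t0 ^= modulus << shift
--     return t0 & 0xFF
--
-- def aes_INV_affine_map(byte_in: int) -> int:
--
--     c = 0x05
--     out_byte = 0
--     for i in range(8):
--         bit = ((byte_in >> ((i + 2) % 8)) & 1) \
--               ^ ((byte_in >> ((i + 5) % 8)) & 1) \
--               ^ ((byte_in >> ((i + 7) % 8)) & 1) \
--               ^ ((c >> i) & 1)
--         out_byte |= (bit << i)
--     return out_byte
--
-- def inv_sub_bytes_state(state):
--     """Apply InvSubBytes: inverse affine map ثم inverse GF(2^8) inverse to every byte in 4x4 state."""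
--     new = [[0]*4 for _ in range(4)]
--     for r in range(4):
--         for c in range(4):
--             v = state[r][c]
--             mapped = aes_INV_affine_map(v)
--             inv = gf256_inv(mapped)
--             new[r][c] = inv
--     return new
-- ===== SOURCE B (Python) =====
-- # AES InvSubBytes via the standard precomputed 256-entry inverse S-box
-- # (byte-identical to computing the inverse affine map followed by the GF(2^8) inverse).
-- INV_SBOX = [
--     0x52, 0x09, 0x6a, 0xd5, 0x30, 0x36, 0xa5, 0x38, 0xbf, 0x40, 0xa3, 0x9e, 0x81, 0xf3, 0xd7, 0xfb,
--     0x7c, 0xe3, 0x39, 0x82, 0x9b, 0x2f, 0xff, 0x87, 0x34, 0x8e, 0x43, 0x44, 0xc4, 0xde, 0xe9, 0xcb,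
--     0x54, 0x7b, 0x94, 0x32, 0xa6, 0xc2, 0x23, 0x3d, 0xee, 0x4c, 0x95, 0x0b, 0x42, 0xfa, 0xc3, 0x4e,
--     0x08, 0x2e, 0xa1, 0x66, 0x28, 0xd9, 0x24, 0xb2, 0x76, 0x5b, 0xa2, 0x49, 0x6d, 0x8b, 0xd1, 0x25,
--     0x72, 0xf8, 0xf6, 0x64, 0x86, 0x68, 0x98, 0x16, 0xd4, 0xa4, 0x5c, 0xcc, 0x5d, 0x65, 0xb6, 0x92,
--     0x6c, 0x70, 0x48, 0x50, 0xfd, 0xed, 0xb9, 0xda, 0x5e, 0x15, 0x46, 0x57, 0xa7, 0x8d, 0x9d, 0x84,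
--     0x90, 0xd8, 0xab, 0x00, 0x8c, 0xbc, 0xd3, 0x0a, 0xf7, 0xe4, 0x58, 0x05, 0xb8, 0xb3, 0x45, 0x06,
--     0xd0, 0x2c, 0x1e, 0x8f, 0xca, 0x3f, 0x0f, 0x02, 0xc1, 0xaf, 0xbd, 0x03, 0x01, 0x13, 0x8a, 0x6b,
--     0x3a, 0x91, 0x11, 0x41, 0x4f, 0x67, 0xdc, 0xea, 0x97, 0xf2, 0xcf, 0xce, 0xf0, 0xb4, 0xe6, 0x73,
--     0x96, 0xac, 0x74, 0x22, 0xe7, 0xad, 0x35, 0x85, 0xe2, 0xf9, 0x37, 0xe8, 0x1c, 0x75, 0xdf, 0x6e,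
--     0x47, 0xf1, 0x1a, 0x71, 0x1d, 0x29, 0xc5, 0x89, 0x6f, 0xb7, 0x62, 0x0e, 0xaa, 0x18, 0xbe, 0x1b,
--     0xfc, 0x56, 0x3e, 0x4b, 0xc6, 0xd2, 0x79, 0x20, 0x9a, 0xdb, 0xc0, 0xfe, 0x78, 0xcd, 0x5a, 0xf4,
--     0x1f, 0xdd, 0xa8, 0x33, 0x88, 0x07, 0xc7, 0x31, 0xb1, 0x12, 0x10, 0x59, 0x27, 0x80, 0xec, 0x5f,
--     0x60, 0x51, 0x7f, 0xa9, 0x19, 0xb5, 0x4a, 0x0d, 0x2d, 0xe5, 0x7a, 0x9f, 0x93, 0xc9, 0x9c, 0xef,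
--     0xa0, 0xe0, 0x3b, 0x4d, 0xae, 0x2a, 0xf5, 0xb0, 0xc8, 0xeb, 0xbb, 0x3c, 0x83, 0x53, 0x99, 0x61,
--     0x17, 0x2b, 0x04, 0x7e, 0xba, 0x77, 0xd6, 0x26, 0xe1, 0x69, 0x14, 0x63, 0x55, 0x21, 0x0c, 0x7d,
-- ]
--
-- def inv_sub_bytes_state(state):
--     return [[INV_SBOX[state[r][c] & 0xFF] for c in range(4)] for r in range(4)]
-- ===== Notes on version B (the rewrite author's own statement) =====
-- stated objective: simpler
-- what changed: B replaces the per-byte inverse affine map and GF(2^8) extended-Euclid inversion with a single precomputed 256-entry inverse S-box, so each cell becomes one table lookup INV_SBOX[byte & 0xFF].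
import Mathlib
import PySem

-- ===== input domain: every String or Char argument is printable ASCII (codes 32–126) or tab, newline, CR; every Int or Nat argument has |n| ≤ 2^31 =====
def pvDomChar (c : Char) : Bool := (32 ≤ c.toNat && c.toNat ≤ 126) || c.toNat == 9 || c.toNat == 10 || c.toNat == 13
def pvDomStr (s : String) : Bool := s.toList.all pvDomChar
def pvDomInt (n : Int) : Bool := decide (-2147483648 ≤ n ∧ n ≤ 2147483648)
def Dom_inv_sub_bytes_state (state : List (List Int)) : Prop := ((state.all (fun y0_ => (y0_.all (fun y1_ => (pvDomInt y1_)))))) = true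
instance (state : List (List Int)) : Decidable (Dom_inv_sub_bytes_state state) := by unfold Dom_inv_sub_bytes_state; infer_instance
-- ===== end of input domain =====

-- ===== PORT A =====
-- B replaces the per-byte inverse-affine-map + GF(2^8)-inversion arithmetic with a single
-- precomputed 256-entry inverse S-box lookup (objective: simpler).

-- helper of A: Python int.bit_length() (arguments here are always >= 0)
def pyBitLen (n : Nat) : Nat := PySem.Int.bitLength (n : Int)

-- A's 'while r1 != 0' extended-Euclid loop over GF(2)[x]; the fuel only makes the same
-- computation total (it is never exhausted for the 8-bit inputs A feeds it); returns t0.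
def gfLoop : Nat → Nat → Nat → Nat → Nat → Nat
  | 0, _, _, t0, _ => t0
  | fuel+1, r0, r1, t0, t1 =>
    if r1 = 0 then t0
    else
      let shift : Int := ((pyBitLen r0 : Int) - 1) - ((pyBitLen r1 : Int) - 1)
      let s : Nat × Nat × Nat × Nat × Nat :=
        if shift < 0 then (r1, r0, t1, t0, (-shift).toNat) else (r0, r1, t0, t1, shift.toNat)
      match s with
      | (r0, r1, t0, t1, sh) => gfLoop fuel (r0 ^^^ (r1 <<< sh)) r1 (t0 ^^^ (t1 <<< sh)) t1

-- A's 'while t0.bit_length() > 8' reduction loop (fuel as above)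
def gfReduce : Nat → Nat → Nat
  | 0, t0 => t0
  | fuel+1, t0 =>
    if 8 < pyBitLen t0 then gfReduce fuel (t0 ^^^ (283 <<< (pyBitLen t0 - 9))) else t0

-- A calls gf256_inv only on outputs of aes_INV_affine_map, which are >= 0, so Nat state is exact
def gf256_inv (a : Int) : Int :=
  if a = 0 then 0
  else ((gfReduce 1000 (gfLoop 1000 283 a.toNat 0 1) &&& 255 : Nat) : Int)

def aes_INV_affine_map (byte_in : Int) : Int :=
  (List.range 8).foldl (fun (out_byte : Int) (i : Nat) =>
    let bit :=
      PySem.Int.bxor (PySem.Int.bxor (PySem.Int.bxor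
        (PySem.Int.band (byte_in >>> ((i + 2) % 8)) 1)
        (PySem.Int.band (byte_in >>> ((i + 5) % 8)) 1))
        (PySem.Int.band (byte_in >>> ((i + 7) % 8)) 1))
        (PySem.Int.band ((5 : Int) >>> i) 1)
    PySem.Int.bor out_byte (bit <<< i)) 0

-- state[r][c] for r,c in range(4); the getD defaults are never hit under Pre_
def inv_sub_bytes_state (state : List (List Int)) : List (List Int) :=
  (List.range 4).map (fun r => (List.range 4).map (fun c =>
    let v := (state.getD r []).getD c 0
    let mapped := aes_INV_affine_map v
    gf256_inv mapped))

-- ===== PORT B =====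
def INV_SBOX : List Int := [
  82, 9, 106, 213, 48, 54, 165, 56, 191, 64, 163, 158, 129, 243, 215, 251,
  124, 227, 57, 130, 155, 47, 255, 135, 52, 142, 67, 68, 196, 222, 233, 203,
  84, 123, 148, 50, 166, 194, 35, 61, 238, 76, 149, 11, 66, 250, 195, 78,
  8, 46, 161, 102, 40, 217, 36, 178, 118, 91, 162, 73, 109, 139, 209, 37,
  114, 248, 246, 100, 134, 104, 152, 22, 212, 164, 92, 204, 93, 101, 182, 146,
  108, 112, 72, 80, 253, 237, 185, 218, 94, 21, 70, 87, 167, 141, 157, 132,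
  144, 216, 171, 0, 140, 188, 211, 10, 247, 228, 88, 5, 184, 179, 69, 6,
  208, 44, 30, 143, 202, 63, 15, 2, 193, 175, 189, 3, 1, 19, 138, 107,
  58, 145, 17, 65, 79, 103, 220, 234, 151, 242, 207, 206, 240, 180, 230, 115,
  150, 172, 116, 34, 231, 173, 53, 133, 226, 249, 55, 232, 28, 117, 223, 110,
  71, 241, 26, 113, 29, 41, 197, 137, 111, 183, 98, 14, 170, 24, 190, 27,
  252, 86, 62, 75, 198, 210, 121, 32, 154, 219, 192, 254, 120, 205, 90, 244,
  31, 221, 168, 51, 136, 7, 199, 49, 177, 18, 16, 89, 39, 128, 236, 95,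
  96, 81, 127, 169, 25, 181, 74, 13, 45, 229, 122, 159, 147, 201, 156, 239,
  160, 224, 59, 77, 174, 42, 245, 176, 200, 235, 187, 60, 131, 83, 153, 97,
  23, 43, 4, 126, 186, 119, 214, 38, 225, 105, 20, 99, 85, 33, 12, 125]

def inv_sub_bytes_state_alt (state : List (List Int)) : List (List Int) :=
  (List.range 4).map (fun r => (List.range 4).map (fun c =>
    INV_SBOX.getD (PySem.Int.band ((state.getD r []).getD c 0) 255).toNat 0))

-- ===== PRECONDITION & SPEC =====
-- Pre_ excludes exactly the states on which Python A raises IndexError: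
-- fewer than 4 rows, or one of the first 4 rows shorter than 4.
def Pre_inv_sub_bytes_state (state : List (List Int)) : Prop :=
  4 ≤ state.length ∧ ∀ row ∈ state.take 4, 4 ≤ row.length
instance (state : List (List Int)) : Decidable (Pre_inv_sub_bytes_state state) := by
  unfold Pre_inv_sub_bytes_state; infer_instance
def pvWitness_inv_sub_bytes_state : List (List Int) :=
  [[0, 1, 2, 3], [4, 5, 6, 7], [8, 9, 10, 11], [12, 13, 14, 15]]

def Spec_inv_sub_bytes_state (state : List (List Int)) (out : List (List Int)) : Prop := out = inv_sub_bytes_state_alt state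
instance (state : List (List Int)) (out : List (List Int)) : Decidable (Spec_inv_sub_bytes_state state out) := by unfold Spec_inv_sub_bytes_state; infer_instance

-- ===== CLAIM (what is proved, stated in full; the proofs are below) =====
def Claim_equal_inv_sub_bytes_state : Prop := ∀ (state : List (List Int)), Dom_inv_sub_bytes_state state → Pre_inv_sub_bytes_state state → Spec_inv_sub_bytes_state state (inv_sub_bytes_state state)

-- ===== LEMMAS AND PROOFS =====

-- a bit of v below bit 8 equals the same bit of v % 256
lemma bit_mod256 (v : Int) (k : Nat) (hk : k < 8) :
    PySem.Int.band (v >>> k) 1 = PySem.Int.band ((v % 256) >>> k) 1 := by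
  rw [PySem.Int.band_one, PySem.Int.band_one,
      PySem.Int.mod_eq_emod_of_pos (by norm_num), PySem.Int.mod_eq_emod_of_pos (by norm_num)]
  simp only [Int.shiftRight_eq_div_pow]
  interval_cases k <;> norm_num <;> omega

-- Python's v & 0xFF is v mod 256 (two's complement, any sign)
lemma band255_eq_emod (v : Int) : PySem.Int.band v 255 = v % 256 := by
  cases v with
  | ofNat n =>
      rw [show Int.ofNat n = (n : Int) from rfl, show (255 : Int) = ((255 : Nat) : Int) from rfl,
          PySem.Int.band_natCast n 255, Nat.and_two_pow_sub_one_eq_mod n 8]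
      push_cast
      omega
  | negSucc m =>
      have h : PySem.Int.band (Int.negSucc m) 255 = ((255 - ((255 : Nat) &&& m) : Nat) : Int) := by
        simp [PySem.Int.band]
      rw [h, Nat.land_comm, Nat.and_two_pow_sub_one_eq_mod m 8]
      have h2 : m % 256 < 256 := Nat.mod_lt _ (by norm_num)
      have h3 : Int.negSucc m = -(m : Int) - 1 := by simp [Int.negSucc_eq]; ring
      rw [h3]
      push_cast
      omega

-- the inverse affine map reads only the low 8 bits of its input
lemma affine_mod256 (v : Int) : aes_INV_affine_map v = aes_INV_affine_map (v % 256) := by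
  unfold aes_INV_affine_map
  refine PySem.List.foldl_congr_mem _ _ _ _ ?_
  intro acc i hi
  have h2 : (i + 2) % 8 < 8 := Nat.mod_lt _ (by norm_num)
  have h5 : (i + 5) % 8 < 8 := Nat.mod_lt _ (by norm_num)
  have h7 : (i + 7) % 8 < 8 := Nat.mod_lt _ (by norm_num)
  rw [bit_mod256 v _ h2, bit_mod256 v _ h5, bit_mod256 v _ h7]

-- per-byte check of the table against A's arithmetic, for all 256 residues
set_option maxRecDepth 8192 in
lemma table_check : ∀ n : Nat, n < 256 →
    gf256_inv (aes_INV_affine_map (n : Int)) = INV_SBOX.getD n 0 := by decide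

-- the per-cell equality, for every integer byte value
lemma cell_eq (v : Int) :
    gf256_inv (aes_INV_affine_map v) = INV_SBOX.getD (PySem.Int.band v 255).toNat 0 := by
  have hnn : 0 ≤ v % 256 := Int.emod_nonneg v (by norm_num)
  have hlt : v % 256 < 256 := Int.emod_lt_of_pos v (by norm_num)
  have hn : v % 256 = (((v % 256).toNat : Nat) : Int) := by omega
  rw [band255_eq_emod, affine_mod256, hn]
  have : ((((v % 256).toNat : Nat) : Int)).toNat = (v % 256).toNat := by omega
  rw [this]
  exact table_check _ (by omega)

-- ===== VERDICT (by name: the statement is the Claim_ definition above) =====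
theorem inv_sub_bytes_state_spec : Claim_equal_inv_sub_bytes_state := by
  intro state _ _
  unfold Spec_inv_sub_bytes_state inv_sub_bytes_state inv_sub_bytes_state_alt
  refine List.map_congr_left ?_
  intro r _
  refine List.map_congr_left ?_
  intro c _
  exact cell_eq _
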